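-- pv_equiv track=rewrite | github.com/Jyothulachakraveni/codemind-python | small_and_large_characters.py | gun
-- ===== SOURCE A (Python) =====
-- def gun(k):
--     k=str(k)
--     s=[]
--     for i in k:
--         s.append(ord(i))
--     d=max(s)
--     for i in k:
--         if ord(i)==d:
--             return i
-- ===== SOURCE B (Python) =====
-- def gun(k):
--     k = str(k)
--     return max(k, key=ord)
-- ===== Notes on version B (the rewrite author's own statement) =====
-- stated objective: idiomatic
-- what changed: Replaces A's three passes (build a list of ords, take its max, rescan for the first matching char) with a single max(k, key=ord) call, relying on max's first-wins tie rule.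
import Mathlib
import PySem

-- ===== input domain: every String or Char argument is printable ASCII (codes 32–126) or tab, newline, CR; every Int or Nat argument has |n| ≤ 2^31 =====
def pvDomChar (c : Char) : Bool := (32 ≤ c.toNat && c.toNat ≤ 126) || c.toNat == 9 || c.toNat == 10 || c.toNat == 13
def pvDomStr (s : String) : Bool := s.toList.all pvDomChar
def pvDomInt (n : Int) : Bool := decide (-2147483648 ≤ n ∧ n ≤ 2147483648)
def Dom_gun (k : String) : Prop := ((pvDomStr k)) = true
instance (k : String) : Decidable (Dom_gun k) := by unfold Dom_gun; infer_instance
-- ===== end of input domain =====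

-- B replaces A's three passes (ord list, max of it, rescan for first match) with one max(k, key=ord) call (idiomatic).

-- ===== PORT A =====
-- ord(c) as Python's int
def pvOrd (c : Char) : Int := (c.toNat : Int)

-- second loop of A: 'for i in k: if ord(i)==d: return i' ("" = the unreachable fall-off-the-end, excluded by Pre_)
def gunFind (d : Int) : List Char → String
  | [] => ""
  | i :: rest => if pvOrd i == d then String.ofList [i] else gunFind d rest

def gun (k : String) : String :=
  -- s = A's ord list (inlined into the match scrutinee)
  match PySem.List.max? (k.toList.foldl (fun acc i => acc ++ [pvOrd i]) []) (fun x => x) with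
  | none => ""          -- max([]) raises ValueError in Python; excluded by Pre_gun
  | some d => gunFind d k.toList

-- ===== PORT B =====
def gun_alt (k : String) : String :=
  match PySem.List.max? k.toList pvOrd with
  | none => ""          -- max('') raises ValueError in Python; excluded by Pre_gun
  | some c => String.ofList [c]

-- ===== PRECONDITION & SPEC =====
-- Pre_ excludes exactly the empty string, on which A's max([]) raises ValueError (so does B's max).
def Pre_gun (k : String) : Prop := k ≠ ""
instance (k : String) : Decidable (Pre_gun k) := by unfold Pre_gun; infer_instance
def pvWitness_gun : String := "ab"

def Spec_gun (k : String) (out : String) : Prop := out = gun_alt k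
instance (k : String) (out : String) : Decidable (Spec_gun k out) := by unfold Spec_gun; infer_instance

-- ===== CLAIM (what is proved, stated in full; the proofs are below) =====
def Claim_equal_gun : Prop := ∀ (k : String), Dom_gun k → Pre_gun k → Spec_gun k (gun k)

-- ===== LEMMAS AND PROOFS =====

-- the foldl step of PySem.List.max?
def pvStep {α : Type} (f : α → Int) (acc : Option α) (x : α) : Option α :=
  match acc with
  | none => some x
  | some m => if f m < f x then some x else some m

theorem max?_eq_foldl {α : Type} (f : α → Int) (xs : List α) :
    PySem.List.max? xs f = xs.foldl (pvStep f) none := rfl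

-- A's first loop builds the list of keys
theorem foldl_append_map (f : Char → Int) (cs : List Char) (acc : List Int) :
    cs.foldl (fun a i => a ++ [f i]) acc = acc ++ cs.map f := by
  induction cs generalizing acc with
  | nil => simp
  | cons c t ih => simp [List.foldl, ih]

-- max over the mapped list equals f of max over the list
theorem foldl_step_map (f : Char → Int) (cs : List Char) (m : Option Char) :
    (cs.map f).foldl (pvStep (fun x => x)) (m.map f) = (cs.foldl (pvStep f) m).map f := by
  induction cs generalizing m with
  | nil => rfl
  | cons c t ih =>
    cases m with
    | none => simpa using ih (some c)
    | some a =>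
      simp only [List.map_cons, List.foldl_cons, pvStep, Option.map_some]
      by_cases h : f a < f c
      · simp only [if_pos h]; simpa using ih (some c)
      · simp only [if_neg h]; simpa using ih (some a)

-- S1: the running max m either is the start a or has strictly larger key
theorem step_start_or_lt (f : Char → Int) (t : List Char) (a m : Char)
    (h : t.foldl (pvStep f) (some a) = some m) : m = a ∨ f a < f m := by
  induction t generalizing a with
  | nil => left; simpa using h.symm
  | cons x u ih =>
    simp only [List.foldl_cons, pvStep] at h
    by_cases hx : f a < f x
    · rw [if_pos hx] at h
      rcases ih x h with h1 | h1
      · right; rw [h1]; exact hx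
      · right; omega
    · rw [if_neg hx] at h
      exact ih a h

-- S2': lowering the start below the eventual strict max does not change the result
theorem step_start_irrel (f : Char → Int) (t : List Char) (a b m : Char)
    (hba : f b ≤ f a) (h : t.foldl (pvStep f) (some a) = some m) (hlt : f a < f m) :
    t.foldl (pvStep f) (some b) = some m := by
  induction t generalizing a b with
  | nil => simp only [List.foldl_nil, Option.some_inj] at h; subst h; omega
  | cons x u ih =>
    simp only [List.foldl_cons, pvStep] at h ⊢
    by_cases hx : f a < f x
    · rw [if_pos hx] at h
      rw [if_pos (by omega)]
      exact h
    · rw [if_neg hx] at h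
      by_cases hbx : f b < f x
      · rw [if_pos hbx]
        exact ih a x (by omega) h hlt
      · rw [if_neg hbx]
        exact ih a b hba h hlt

-- the first maximum: max? = some m ⇒ find? (key = key m) = some m
theorem max?_find? (f : Char → Int) (cs : List Char) (m : Char)
    (h : PySem.List.max? cs f = some m) :
    cs.find? (fun c => f c == f m) = some m := by
  induction cs with
  | nil => simp [PySem.List.max?] at h
  | cons c t ih =>
    rw [max?_eq_foldl] at h
    simp only [List.foldl_cons, pvStep] at h
    have hdi := step_start_or_lt f t c m h
    by_cases hc : f c = f m
    · have hm : m = c := by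
        rcases hdi with h1 | h1
        · exact h1
        · exact absurd h1 (by omega)
      simp [List.find?, hc, hm]
    · have hlt : f c < f m := by
        rcases hdi with h1 | h1
        · exact absurd (by rw [h1]) hc
        · exact h1
      have hcf : (f c == f m) = false := by simpa using hc
      rw [List.find?_cons, hcf]
      apply ih
      rw [max?_eq_foldl]
      cases t with
      | nil => simp only [List.foldl_nil, Option.some_inj] at h; subst h; omega
      | cons x u =>
        simp only [List.foldl_cons, pvStep] at h ⊢
        by_cases hx : f c < f x
        · rw [if_pos hx] at h; exact h
        · rw [if_neg hx] at h
          exact step_start_irrel f u c x m (by omega) h hlt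

-- gunFind is find?
theorem gunFind_eq_find? (d : Int) (cs : List Char) :
    gunFind d cs = (cs.find? (fun c => pvOrd c == d)).elim "" (fun c => String.ofList [c]) := by
  induction cs with
  | nil => rfl
  | cons c t ih =>
    by_cases hc : pvOrd c == d
    · simp [gunFind, List.find?, hc]
    · simp only [gunFind, List.find?, hc]
      simpa [hc] using ih

-- ===== VERDICT (by name: the statement is the Claim_ definition above) =====
theorem gun_spec : Claim_equal_gun := by
  intro k _ hpre
  unfold Spec_gun gun gun_alt
  have hmap : k.toList.foldl (fun a i => a ++ [pvOrd i]) [] = k.toList.map pvOrd := by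
    simpa using foldl_append_map pvOrd k.toList []
  rw [hmap]
  have hfold : PySem.List.max? (k.toList.map pvOrd) (fun x => x)
      = (PySem.List.max? k.toList pvOrd).map pvOrd := by
    rw [max?_eq_foldl, max?_eq_foldl]
    simpa using foldl_step_map pvOrd k.toList none
  rw [hfold]
  cases hm : PySem.List.max? k.toList pvOrd with
  | none => rfl
  | some m =>
    simp only [Option.map_some]
    rw [gunFind_eq_find?, max?_find? pvOrd k.toList m hm]
    rfl
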